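-- pv_equiv track=rewrite | github.com/ddu0422/study | algorithm/baekjoon/greedy/silver4/25379.py | solution_refactor
-- ===== SOURCE A (Python) =====
-- def solution_refactor(array):
--     odd = 0
--     even = 0
--
--     for value in array:
--         if value & 1:
--             odd += 1
--         else:
--             even += odd
--
--     return min(even, (len(array) - odd) * odd - even)
-- ===== SOURCE B (Python) =====
-- def solution_refactor(array):
--     # Staged: collect the 0-indexed positions of even elements, then the number
--     # of odd-before-even pairs is x = sum(positions) - e*(e-1)//2 (positional
--     # identity), and the answer is min(x, odds*e - x).
--     positions = [i for i, v in enumerate(array) if v % 2 == 0]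
--     e = len(positions)
--     x = sum(positions) - e * (e - 1) // 2
--     odds = len(array) - e
--     return min(x, odds * e - x)
-- ===== Notes on version B (the rewrite author's own statement) =====
-- stated objective: alternative
-- what changed: B drops A's running odd-counter accumulation: it collects the positions of even elements (a staged enumerate/filter pass) and derives the odd-before-even pair count by the closed-form identity x = sum(positions) - e*(e-1)//2.
import Mathlib
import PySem

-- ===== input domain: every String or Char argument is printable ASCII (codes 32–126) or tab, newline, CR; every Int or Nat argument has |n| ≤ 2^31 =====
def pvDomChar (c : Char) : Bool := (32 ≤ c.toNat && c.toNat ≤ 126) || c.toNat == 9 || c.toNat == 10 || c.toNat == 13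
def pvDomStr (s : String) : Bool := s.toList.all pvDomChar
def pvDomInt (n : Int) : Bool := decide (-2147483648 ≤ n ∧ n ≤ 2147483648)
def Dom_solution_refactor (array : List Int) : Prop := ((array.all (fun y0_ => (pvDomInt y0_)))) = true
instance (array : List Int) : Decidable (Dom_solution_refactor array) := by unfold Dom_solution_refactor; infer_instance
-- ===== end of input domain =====

-- B replaces A's running "odd counter added at each even" accumulation by a staged
-- enumerate/filter pass over even positions plus the closed form e*(e-1)//2 (objective: alternative).

-- ===== PORT A =====
def solution_refactor (array : List Int) : Int :=
  let st := array.foldl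
    (fun (st : Int × Int) value =>
      if PySem.Int.band value 1 ≠ 0 then (st.1 + 1, st.2) else (st.1, st.2 + st.1))
    (0, 0)
  min st.2 (((array.length : Int) - st.1) * st.1 - st.2)

-- ===== PORT B =====
def solution_refactor_alt (array : List Int) : Int :=
  let positions :=
    ((PySem.List.enumerate array).filter (fun p => PySem.Int.mod p.2 2 = 0)).map (fun p => p.1)
  let e : Int := positions.length
  let x := positions.sum - PySem.Int.floordiv (e * (e - 1)) 2
  let odds := (array.length : Int) - e
  min x (odds * e - x)

-- ===== PRECONDITION & SPEC =====
def Spec_solution_refactor (array : List Int) (out : Int) : Prop := out = solution_refactor_alt array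
instance (array : List Int) (out : Int) : Decidable (Spec_solution_refactor array out) := by unfold Spec_solution_refactor; infer_instance

-- ===== CLAIM (what is proved, stated in full; the proofs are below) =====
def Claim_equal_solution_refactor : Prop := ∀ (array : List Int), Dom_solution_refactor array → Spec_solution_refactor array (solution_refactor array)

-- ===== LEMMAS AND PROOFS =====

-- even count of a list
def pvE : List Int → Int
  | [] => 0
  | v :: l => (if PySem.Int.mod v 2 = 0 then 1 else 0) + pvE l

-- number of (odd, even) pairs with the odd strictly before the even
def pvX : List Int → Int
  | [] => 0
  | v :: l => if PySem.Int.mod v 2 = 0 then pvX l else pvE l + pvX l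

-- sum of positions (starting at i) of the even elements
def pvP : Int → List Int → Int
  | _, [] => 0
  | i, v :: l => (if PySem.Int.mod v 2 = 0 then i else 0) + pvP (i + 1) l

theorem pvA_fold (l : List Int) (odd even : Int) :
    l.foldl (fun (st : Int × Int) value =>
      if PySem.Int.band value 1 ≠ 0 then (st.1 + 1, st.2) else (st.1, st.2 + st.1)) (odd, even)
    = (odd + ((l.length : Int) - pvE l), even + pvX l + odd * pvE l) := by
  induction l generalizing odd even with
  | nil => simp [pvE, pvX]
  | cons v l ih =>
    by_cases h : PySem.Int.mod v 2 = 0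
    · rw [List.foldl_cons, if_neg (by rw [PySem.Int.band_one]; exact not_not_intro h), ih]
      simp only [pvE, pvX, h, List.length_cons, ite_true, Prod.mk.injEq]
      constructor <;> push_cast <;> ring
    · rw [List.foldl_cons, if_pos (by rw [PySem.Int.band_one]; exact h), ih]
      simp only [pvE, pvX, h, List.length_cons, ite_false, Prod.mk.injEq]
      constructor <;> push_cast <;> ring

theorem pvB_positions (l : List Int) (i : Int) :
    ((((PySem.List.enumerate l i).filter (fun p => PySem.Int.mod p.2 2 = 0)).map
        (fun p => p.1)).length : Int)
      = pvE l
    ∧ (((PySem.List.enumerate l i).filter (fun p => PySem.Int.mod p.2 2 = 0)).map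
        (fun p => p.1)).sum
      = pvP i l := by
  induction l generalizing i with
  | nil => simp [PySem.List.enumerate_nil, pvE, pvP]
  | cons v l ih =>
    rw [PySem.List.enumerate_cons]
    by_cases h : PySem.Int.mod v 2 = 0 <;>
      simp only [List.filter_cons, h, decide_true, decide_false, if_true, if_false,
        List.map_cons, List.length_cons, List.sum_cons, pvE, pvP, ite_true, ite_false] <;>
      obtain ⟨h1, h2⟩ := ih (i + 1) <;> constructor <;> push_cast [h1, h2] <;> ring

theorem pvP_eq (l : List Int) (i : Int) :
    2 * pvP i l = 2 * pvX l + 2 * i * pvE l + pvE l * (pvE l - 1) := by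
  induction l generalizing i with
  | nil => simp [pvP, pvX, pvE]
  | cons v l ih =>
    simp only [pvP, pvX, pvE]
    by_cases h : PySem.Int.mod v 2 = 0 <;>
      simp only [h, if_true, if_false, ite_true, ite_false] <;>
      [skip; skip] <;> (rw [mul_add, ih]; ring)

theorem pv_fdiv_even (k : Int) : PySem.Int.floordiv (2 * k) 2 = k := by
  rw [PySem.Int.floordiv_eq_ediv_of_pos (by omega)]
  omega

-- ===== VERDICT (by name: the statement is the Claim_ definition above) =====
theorem solution_refactor_spec : Claim_equal_solution_refactor := by
  intro array _
  unfold Spec_solution_refactor solution_refactor solution_refactor_alt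
  rw [pvA_fold]
  obtain ⟨h1, h2⟩ := pvB_positions array 0
  simp only [h1, h2, zero_add]
  have hP : pvP 0 array - PySem.Int.floordiv (pvE array * (pvE array - 1)) 2 = pvX array := by
    have h := pvP_eq array 0
    have he : pvE array * (pvE array - 1) = 2 * (pvP 0 array - pvX array) := by omega
    rw [he, pv_fdiv_even]; ring
  rw [hP]
  congr 1 <;> ring
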